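-- pv_equiv track=rewrite | github.com/OpenRareDisease/openrd | apps/report-manager/app/services/fshd_report_service.py | _build_line_windows
-- ===== SOURCE A (Python) =====
-- from typing import Any, Dict, Iterable, List, Optional, Tuple
--
-- def _build_line_windows(lines: List[str], max_window: int = 2) -> List[str]:
--     windows: List[str] = list(lines)
--     for index in range(len(lines)):
--         merged = lines[index]
--         for width in range(1, max_window):
--             if index + width >= len(lines):
--                 break
--             merged = f"{merged}{lines[index + width]}"
--             windows.append(merged)
--     return windows
-- ===== SOURCE B (Python) =====
-- from typing import List
--
-- def _build_line_windows(lines: List[str], max_window: int = 2) -> List[str]: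
--     # Walk the suffixes of `lines` instead of indexing: for each suffix, the
--     # windows starting there are the running concatenations of its head with
--     # the next pieces, bounded by the slice stop `limit`.
--     limit = max_window if max_window > 1 else 1  # sizes > 1 exist only when max_window >= 2
--     out: List[str] = list(lines)
--     suffix = lines
--     while suffix:
--         acc = suffix[0]
--         for piece in suffix[1:limit]:
--             acc = acc + piece
--             out.append(acc)
--         suffix = suffix[1:]
--     return out
-- ===== Notes on version B (the rewrite author's own statement) =====
-- stated objective: alternative
-- what changed: B drops A's integer index loop entirely: it walks the suffixes of the list, and for each suffix emits the running concatenations of its head with the pieces of the slice suffix[1:limit], so the length bound comes from slicing instead of A's index+width>=len break.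
import Mathlib
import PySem

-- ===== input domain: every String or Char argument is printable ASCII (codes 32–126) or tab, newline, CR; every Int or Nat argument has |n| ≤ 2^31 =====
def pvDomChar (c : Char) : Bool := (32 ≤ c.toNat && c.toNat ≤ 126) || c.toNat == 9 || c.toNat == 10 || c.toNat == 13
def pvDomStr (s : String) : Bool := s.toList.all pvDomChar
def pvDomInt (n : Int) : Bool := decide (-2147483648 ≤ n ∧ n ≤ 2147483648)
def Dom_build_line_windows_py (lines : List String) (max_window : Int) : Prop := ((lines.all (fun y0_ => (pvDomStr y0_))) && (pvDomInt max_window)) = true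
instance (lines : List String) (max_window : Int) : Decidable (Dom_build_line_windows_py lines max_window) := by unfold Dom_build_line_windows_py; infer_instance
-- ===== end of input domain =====

-- B replaces A's integer index loop by a walk over the suffixes of the list, each window
-- coming from a slice of the current suffix (alternative decomposition; same outputs).

-- ===== PORT A =====
-- inner `for width in range(1, max_window)` loop with its break and the running `merged` accumulator
-- (f"{merged}{lines[index+width]}" is string concatenation, ported exactly as PySem.Str.join "" [merged, x])
def pvA_inner (lines : List String) (n index mw w : Int) (merged : String) (windows : List String) : List String :=
  if _hlt : w < mw then
    if index + w ≥ n then windows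
    else
      let merged' := PySem.Str.join "" [merged, PySem.List.pyGetD lines (index + w) ""]
      pvA_inner lines n index mw (w + 1) merged' (windows ++ [merged'])
  else windows
termination_by (mw - w).toNat
decreasing_by omega

def build_line_windows_py (lines : List String) (max_window : Int) : List String :=
  let n : Int := (lines.length : Int)
  (PySem.List.pyRange 0 n 1).foldl
    (fun windows index =>
      pvA_inner lines n index max_window 1
        (PySem.List.pyGetD lines index "") windows)
    lines

-- ===== PORT B =====
-- Python `a + b` on strings, exact: concatenation of the character lists
def pvCat (a b : String) : String := String.ofList (a.toList ++ b.toList)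

-- the `while suffix:` loop: structural recursion on the suffix (suffix = suffix[1:] each round);
-- the inner `for piece in suffix[1:limit]` accumulates the pair (acc, appended windows)
def pvB_walk (limit : Int) : List String → List String
  | [] => []
  | s :: rest =>
      let st := (PySem.List.slice (s :: rest) (some 1) (some limit)).foldl
        (fun (st : String × List String) piece =>
          let m := pvCat st.1 piece
          (m, st.2 ++ [m])) (s, ([] : List String))
      st.2 ++ pvB_walk limit rest

def build_line_windows_py_alt (lines : List String) (max_window : Int) : List String :=
  let limit : Int := if max_window > 1 then max_window else 1
  lines ++ pvB_walk limit lines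

-- ===== PRECONDITION & SPEC =====
def Spec_build_line_windows_py (lines : List String) (max_window : Int) (out : List String) : Prop := out = build_line_windows_py_alt lines max_window
instance (lines : List String) (max_window : Int) (out : List String) : Decidable (Spec_build_line_windows_py lines max_window out) := by unfold Spec_build_line_windows_py; infer_instance

-- ===== CLAIM (what is proved, stated in full; the proofs are below) =====
def Claim_equal_build_line_windows_py : Prop := ∀ (lines : List String) (max_window : Int), Dom_build_line_windows_py lines max_window → Spec_build_line_windows_py lines max_window (build_line_windows_py lines max_window)

-- ===== LEMMAS AND PROOFS =====

-- the common value of both inner loops: the running concatenations of `acc` with the pieces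
def pvGrp (acc : String) : List String → List String
  | [] => []
  | p :: ps => pvCat acc p :: pvGrp (pvCat acc p) ps

def pvK (mw : Int) : Nat := (mw - 1).toNat

theorem pv_cat_eq_join (a b : String) :
    PySem.Str.join "" [a, b] = pvCat a b := by
  apply String.toList_inj.mp
  simp [PySem.Str.toList_join, pvCat, PySem.Chars.join_cons_cons, PySem.Chars.join_singleton]

-- A's inner loop appends the running concatenations of the next (mw - w) lines
theorem pvA_inner_eq_grp (lines : List String) (index w mw : Int) (h0 : 0 ≤ index)
    (hw : 1 ≤ w) (merged : String) (ws : List String) :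
    pvA_inner lines (lines.length : Int) index mw w merged ws
      = ws ++ pvGrp merged ((lines.drop (index + w).toNat).take (mw - w).toNat) := by
  rw [pvA_inner]
  by_cases hlt : w < mw
  · rw [dif_pos hlt]
    by_cases hbrk : index + w ≥ (lines.length : Int)
    · rw [if_pos hbrk]
      have hdrop : lines.drop (index + w).toNat = [] := by
        apply List.drop_eq_nil_of_le; omega
      simp [hdrop, pvGrp]
    · rw [if_neg hbrk]
      have hk : (index + w).toNat < lines.length := by omega
      have hdrop : lines.drop (index + w).toNat
          = lines[(index + w).toNat] :: lines.drop ((index + w).toNat + 1) := by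
        exact List.drop_eq_getElem_cons hk
      have hget : PySem.List.pyGetD lines (index + w) ""
          = lines[(index + w).toNat] := by
        exact PySem.List.pyGetD_eq_getElem lines (i := index + w) "" (by omega) (by omega)
      have htake : ((mw - w).toNat) = ((mw - (w+1)).toNat) + 1 := by omega
      have hd1 : ((index + w).toNat + 1) = (index + (w + 1)).toNat := by omega
      rw [pvA_inner_eq_grp lines index (w+1) mw h0 (by omega), hdrop, htake,
          List.take_succ_cons, pvGrp, hget, pv_cat_eq_join, hd1]
      simp
  · rw [dif_neg hlt]
    have : (mw - w).toNat = 0 := by omega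
    simp [this, pvGrp]
termination_by (mw - w).toNat
decreasing_by omega

-- B's inner fold computes the same running concatenations
theorem pvB_fold_eq_grp (pieces : List String) (m : String) (ws : List String) :
    (pieces.foldl (fun (st : String × List String) piece =>
        let q := pvCat st.1 piece
        (q, st.2 ++ [q])) (m, ws)).2 = ws ++ pvGrp m pieces := by
  induction pieces generalizing m ws with
  | nil => simp [pvGrp]
  | cons p ps ih => simp [List.foldl_cons, pvGrp, ih]

-- the slice suffix[1:limit] is the next (mw - 1) pieces
theorem pv_slice_take (mw : Int) (s : String) (rest : List String) :
    PySem.List.slice (s :: rest) (some 1) (some (if mw > 1 then mw else 1))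
      = rest.take (pvK mw) := by
  by_cases h : mw > 1
  · rw [if_pos h, PySem.List.slice_toNat (s :: rest) (a := 1) (b := mw) (by omega) (by omega)]
    have h1 : mw.toNat - (1:Int).toNat = pvK mw := by simp [pvK, Int.toNat_one]
    rw [h1]
    norm_num
  · rw [if_neg h, PySem.List.slice_toNat (s :: rest) (a := 1) (b := 1) (by omega) (by omega)]
    have h1 : pvK mw = 0 := by simp [pvK]; omega
    simp [h1]

-- B's suffix walk, written as the per-start-index groups
theorem pvB_walk_eq_tails (mw : Int) (lines : List String) :
    pvB_walk (if mw > 1 then mw else 1) lines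
      = (List.range lines.length).flatMap
          (fun i => pvGrp (lines.getD i "") ((lines.drop (i+1)).take (pvK mw))) := by
  induction lines with
  | nil => simp [pvB_walk]
  | cons s rest ih =>
    rw [pvB_walk]
    simp only [pv_slice_take, pvB_fold_eq_grp, List.nil_append]
    rw [ih, List.length_cons, List.range_succ_eq_map, List.flatMap_cons, List.flatMap_map]
    simp

-- ===== VERDICT (by name: the statement is the Claim_ definition above) =====
theorem build_line_windows_py_spec : Claim_equal_build_line_windows_py := by
  intro lines max_window _
  unfold Spec_build_line_windows_py build_line_windows_py build_line_windows_py_alt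
  dsimp only
  have hbody : (PySem.List.pyRange 0 (lines.length : Int) 1).foldl
      (fun windows index =>
        pvA_inner lines (lines.length : Int) index max_window 1
          (PySem.List.pyGetD lines index "") windows) lines
      = (PySem.List.pyRange 0 (lines.length : Int) 1).foldl
        (fun windows index => windows ++
          pvGrp (PySem.List.pyGetD lines index "")
            ((lines.drop (index + 1).toNat).take (max_window - 1).toNat)) lines := by
    apply PySem.List.foldl_congr_mem
    intro ws index hmem
    have hr := (PySem.List.mem_pyRange_one).mp hmem
    exact pvA_inner_eq_grp lines index 1 max_window (by omega) (by omega) _ ws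
  rw [hbody, PySem.List.foldl_append_eq_flatMap, pvB_walk_eq_tails max_window lines,
      PySem.List.pyRange_one, List.flatMap_map]
  congr 1
  have hlen : ((lines.length : Int) - 0).toNat = lines.length := by omega
  rw [hlen]
  apply List.flatMap_congr
  intro k hk
  have hk' : k < lines.length := List.mem_range.mp hk
  have h1 : PySem.List.pyGetD lines (0 + (k : Int)) "" = lines.getD k "" := by
    rw [zero_add, PySem.List.pyGetD_natCast]
  have h2 : ((0 : Int) + (k : Int) + 1).toNat = k + 1 := by omega
  have h3 : (max_window - 1).toNat = pvK max_window := rfl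
  rw [h1, h2, h3]
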